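-- pv_equiv track=rewrite | github.com/oseyosey/verl | examples/data_preprocess/no_robots_match_custom.py | _is_valid_example
-- ===== SOURCE A (Python) =====
-- def _is_valid_example(example) -> bool:
--     messages = example.get("messages", [])
--     if not isinstance(messages, list) or len(messages) < 2:
--         return False
--     last_assistant_idx = None
--     for i in range(len(messages) - 1, -1, -1):
--         if messages[i].get("role", "") == "assistant":
--             last_assistant_idx = i
--             break
--     if last_assistant_idx is None or last_assistant_idx == 0:
--         return False
--     gt = str(messages[last_assistant_idx].get("content", "")).strip()
--     if gt == "":
--         return False
--     # Ensure there is at least one non-empty prior message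
--     for m in messages[:last_assistant_idx]:
--         c = str(m.get("content", "")).strip()
--         if c:
--             return True
--     return False
-- ===== SOURCE B (Python) =====
-- def _is_valid_example(example) -> bool:
--     messages = example.get("messages", [])
--     if not isinstance(messages, list) or len(messages) < 2:
--         return False
--     verdict = False
--     seen_nonempty = False
--     for i, m in enumerate(messages):
--         content = str(m.get("content", "")).strip()
--         if m.get("role", "") == "assistant":
--             verdict = i != 0 and content != "" and seen_nonempty
--         if content != "":
--             seen_nonempty = True
--     return verdict
-- ===== Notes on version B (the rewrite author's own statement) =====
-- stated objective: alternative
-- what changed: Replaced the backward scan for the last assistant message plus a second prefix scan for prior non-empty content by one forward pass that maintains a seen_nonempty flag and records a verdict at each assistant message, returning the last recorded verdict.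
import Mathlib
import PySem

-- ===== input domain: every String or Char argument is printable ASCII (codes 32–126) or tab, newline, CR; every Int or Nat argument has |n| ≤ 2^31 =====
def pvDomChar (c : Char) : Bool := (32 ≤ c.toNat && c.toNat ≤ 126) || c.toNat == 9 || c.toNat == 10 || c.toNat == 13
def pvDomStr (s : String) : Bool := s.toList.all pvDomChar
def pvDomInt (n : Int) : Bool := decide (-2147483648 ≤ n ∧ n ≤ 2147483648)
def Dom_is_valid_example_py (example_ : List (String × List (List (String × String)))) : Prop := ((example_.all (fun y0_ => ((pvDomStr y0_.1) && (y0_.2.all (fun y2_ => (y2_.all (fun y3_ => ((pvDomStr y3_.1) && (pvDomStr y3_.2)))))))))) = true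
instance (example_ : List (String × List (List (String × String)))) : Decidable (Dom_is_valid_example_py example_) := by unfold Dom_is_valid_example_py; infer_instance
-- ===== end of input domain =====

-- B replaces A's backward last-assistant search plus a second scan of the prefix by a single
-- forward pass with maintained state (alternative decomposition, same asymptotic cost).

-- ===== PORT A =====
-- the backward 'for i in range(len(messages)-1, -1, -1): … break' loop of A
def pvFindLastA (msgs : List (List (String × String))) : List Int → Option Int
  | [] => none
  | i :: rest =>
    if (PySem.Dict.mk (PySem.List.pyGetD msgs i [])).getD "role" "" = "assistant" then some i
    else pvFindLastA msgs rest

def is_valid_example_py (example_ : List (String × List (List (String × String)))) : Bool :=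
  let messages := (PySem.Dict.mk example_).getD "messages" []
  if messages.length < 2 then false
  else
    match pvFindLastA messages (PySem.List.pyRange ((messages.length : Int) - 1) (-1) (-1)) with
    | none => false
    | some idx =>
      if idx = 0 then false
      else
        let gt := PySem.Str.strip ((PySem.Dict.mk (PySem.List.pyGetD messages idx [])).getD "content" "")
        if gt = "" then false
        else (PySem.List.slice messages none (some idx)).any
               (fun m => !(PySem.Str.strip ((PySem.Dict.mk m).getD "content" "") = ""))

-- ===== PORT B =====
def is_valid_example_py_alt (example_ : List (String × List (List (String × String)))) : Bool :=
  let messages := (PySem.Dict.mk example_).getD "messages" []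
  if messages.length < 2 then false
  else
    ((PySem.List.enumerate messages).foldl
      (fun (st : Bool × Bool) im =>
        let content := PySem.Str.strip ((PySem.Dict.mk im.2).getD "content" "")
        let verdict := if (PySem.Dict.mk im.2).getD "role" "" = "assistant"
          then decide (im.1 ≠ 0) && decide (content ≠ "") && st.2
          else st.1
        (verdict, st.2 || decide (content ≠ "")))
      (false, false)).1

-- ===== PRECONDITION & SPEC =====
def Spec_is_valid_example_py (example_ : List (String × List (List (String × String)))) (out : Bool) : Prop := out = is_valid_example_py_alt example_
instance (example_ : List (String × List (List (String × String)))) (out : Bool) : Decidable (Spec_is_valid_example_py example_ out) := by unfold Spec_is_valid_example_py; infer_instance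

-- ===== CLAIM (what is proved, stated in full; the proofs are below) =====
def Claim_equal_is_valid_example_py : Prop := ∀ (example_ : List (String × List (List (String × String)))), Dom_is_valid_example_py example_ → Spec_is_valid_example_py example_ (is_valid_example_py example_)

-- ===== LEMMAS AND PROOFS =====

def pvCont (m : List (String × String)) : String :=
  PySem.Str.strip ((PySem.Dict.mk m).getD "content" "")

def pvIsA (m : List (String × String)) : Bool :=
  decide ((PySem.Dict.mk m).getD "role" "" = "assistant")

-- index of the last message with role "assistant"
def pvSpecLast : List (List (String × String)) → Option Nat
  | [] => none
  | m :: rest =>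
    match pvSpecLast rest with
    | some k => some (k + 1)
    | none => if pvIsA m then some 0 else none

def pvAnyNE (msgs : List (List (String × String))) : Bool :=
  msgs.any (fun m => decide (pvCont m ≠ ""))

-- common specification of both cores (after the length guard)
def pvSpec (msgs : List (List (String × String))) : Bool :=
  match pvSpecLast msgs with
  | none => false
  | some k => decide (k ≠ 0) && decide (pvCont (msgs.getD k []) ≠ "") && pvAnyNE (msgs.take k)

theorem pvGetD_append_len {α : Type} (xs : List α) (m d : α) :
    (xs ++ [m]).getD xs.length d = m := by
  simp [List.getD]

theorem pvGetD_append_lt {α : Type} (xs ys : List α) (k : Nat) (d : α) (h : k < xs.length) :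
    (xs ++ ys).getD k d = xs.getD k d := by
  simp [List.getD, List.getElem?_append_left h]

theorem pvSpecLast_append (msgs : List (List (String × String))) (m : List (String × String)) :
    pvSpecLast (msgs ++ [m]) = if pvIsA m then some msgs.length else pvSpecLast msgs := by
  induction msgs with
  | nil =>
    simp only [List.nil_append, pvSpecLast, List.length_nil]
  | cons x xs ih =>
    simp only [List.cons_append, pvSpecLast, ih, List.length_cons]
    by_cases h : pvIsA m = true
    · simp [h]
    · simp only [h, Bool.false_eq_true, if_false]

theorem pvSpecLast_lt (msgs : List (List (String × String))) (k : Nat)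
    (h : pvSpecLast msgs = some k) : k < msgs.length := by
  induction msgs generalizing k with
  | nil => simp [pvSpecLast] at h
  | cons x xs ih =>
    simp only [pvSpecLast] at h
    cases hx : pvSpecLast xs with
    | some j =>
      rw [hx] at h
      cases h
      have := ih j hx
      simp only [List.length_cons]
      omega
    | none =>
      rw [hx] at h
      by_cases ha : pvIsA x = true
      · rw [if_pos ha] at h; cases h; simp
      · rw [if_neg ha] at h; cases h

theorem pvFindLastA_append (msgs : List (List (String × String))) (m : List (String × String))
    (r : List Int) (hr : ∀ i ∈ r, 0 ≤ i ∧ i < (msgs.length : Int)) :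
    pvFindLastA (msgs ++ [m]) r = pvFindLastA msgs r := by
  induction r with
  | nil => rfl
  | cons i rest ih =>
    have hi := hr i (by simp)
    have hlt : i.toNat < msgs.length := by omega
    have hic : i = ((i.toNat : Nat) : Int) := by omega
    simp only [pvFindLastA]
    rw [hic, PySem.List.pyGetD_natCast, PySem.List.pyGetD_natCast,
      pvGetD_append_lt _ _ _ _ hlt]
    split
    · rfl
    · exact ih (fun j hj => hr j (by simp [hj]))

theorem pvFindLastA_eq (msgs : List (List (String × String))) :
    pvFindLastA msgs (PySem.List.pyRange ((msgs.length : Int) - 1) (-1) (-1))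
      = (pvSpecLast msgs).map Int.ofNat := by
  induction msgs using List.reverseRecOn with
  | nil => simp [PySem.List.pyRange_neg_one_eq_nil, pvFindLastA, pvSpecLast]
  | append_singleton msgs m ih =>
    have hlen : ((msgs ++ [m]).length : Int) - 1 = (msgs.length : Int) := by simp
    rw [hlen, PySem.List.pyRange_neg_one_cons (by omega)]
    simp only [pvFindLastA]
    rw [PySem.List.pyGetD_natCast, pvGetD_append_len]
    rw [pvSpecLast_append]
    by_cases h : (PySem.Dict.mk m).getD "role" "" = "assistant"
    · have hA : pvIsA m = true := by simp [pvIsA, h]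
      simp [h, hA, Int.ofNat_eq_natCast]
    · have hA : ¬ (pvIsA m = true) := by simp [pvIsA, h]
      rw [if_neg h, if_neg hA]
      rw [pvFindLastA_append msgs m _ (fun i hi => by
        rw [PySem.List.mem_pyRange_neg_one] at hi; omega)]
      exact ih

theorem acore_eq_spec (msgs : List (List (String × String))) :
    (match pvFindLastA msgs (PySem.List.pyRange ((msgs.length : Int) - 1) (-1) (-1)) with
    | none => false
    | some idx =>
      if idx = 0 then false
      else
        let gt := PySem.Str.strip ((PySem.Dict.mk (PySem.List.pyGetD msgs idx [])).getD "content" "")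
        if gt = "" then false
        else (PySem.List.slice msgs none (some idx)).any
               (fun m => !(PySem.Str.strip ((PySem.Dict.mk m).getD "content" "") = "")))
      = pvSpec msgs := by
  rw [pvFindLastA_eq]
  cases hk : pvSpecLast msgs with
  | none => simp [pvSpec, hk]
  | some k =>
    have hlt := pvSpecLast_lt msgs k hk
    simp only [Option.map_some]
    by_cases h0 : k = 0
    · simp [pvSpec, hk, h0]
    · simp [pvSpec, hk, h0, pvCont, pvAnyNE]

theorem bcore_eq_spec (msgs : List (List (String × String))) :
    ((PySem.List.enumerate msgs).foldl
      (fun (st : Bool × Bool) im =>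
        let content := PySem.Str.strip ((PySem.Dict.mk im.2).getD "content" "")
        let verdict := if (PySem.Dict.mk im.2).getD "role" "" = "assistant"
          then decide (im.1 ≠ 0) && decide (content ≠ "") && st.2
          else st.1
        (verdict, st.2 || decide (content ≠ "")))
      (false, false)) = (pvSpec msgs, pvAnyNE msgs) := by
  induction msgs using List.reverseRecOn with
  | nil => simp [PySem.List.enumerate, pvSpec, pvSpecLast, pvAnyNE]
  | append_singleton msgs m ih =>
    rw [PySem.List.enumerate_append, List.foldl_append, ih]
    simp only [PySem.List.enumerate_cons, PySem.List.enumerate_nil, List.foldl_cons, List.foldl_nil]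
    have hne : pvAnyNE (msgs ++ [m]) = (pvAnyNE msgs || decide (pvCont m ≠ "")) := by
      simp [pvAnyNE, pvCont, List.any_append]
    rw [hne]
    refine Prod.ext ?_ rfl
    simp only [pvSpec, pvSpecLast_append]
    by_cases h : (PySem.Dict.mk m).getD "role" "" = "assistant"
    · have hA : pvIsA m = true := by simp [pvIsA, h]
      simp only [h, hA, if_true]
      rw [pvGetD_append_len, List.take_left]
      simp [pvCont]
    · have hA : ¬ (pvIsA m = true) := by simp [pvIsA, h]
      simp only [if_neg h, if_neg hA]
      cases hk : pvSpecLast msgs with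
      | none => simp
      | some k =>
        have hlt := pvSpecLast_lt msgs k hk
        have h1 : (msgs ++ [m])[k]? = msgs[k]? := List.getElem?_append_left hlt
        have h2 : List.take k (msgs ++ [m]) = List.take k msgs :=
          List.take_append_of_le_length (by omega)
        simp [h1, h2]

theorem is_valid_example_py_eq (example_ : List (String × List (List (String × String)))) :
    is_valid_example_py example_ = is_valid_example_py_alt example_ := by
  unfold is_valid_example_py is_valid_example_py_alt
  set msgs := (PySem.Dict.mk example_).getD "messages" [] with hm
  by_cases h2 : msgs.length < 2
  · simp [h2]
  · simp only [if_neg h2]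
    rw [bcore_eq_spec]
    exact acore_eq_spec msgs

-- ===== VERDICT (by name: the statement is the Claim_ definition above) =====
theorem is_valid_example_py_spec : Claim_equal_is_valid_example_py := by
  intro example_ _
  unfold Spec_is_valid_example_py
  exact is_valid_example_py_eq example_
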